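-- pv_equiv track=rewrite | github.com/yasuuucchi/-moneyball_dojo | season_simulator.py | determine_playoffs
-- ===== SOURCE A (Python) =====
-- DIVISIONS = {
--     'AL East': ['New York Yankees', 'Baltimore Orioles', 'Toronto Blue Jays',
--                 'Boston Red Sox', 'Tampa Bay Rays'],
--     'AL Central': ['Cleveland Guardians', 'Minnesota Twins', 'Kansas City Royals',
--                    'Detroit Tigers', 'Chicago White Sox'],
--     'AL West': ['Houston Astros', 'Seattle Mariners', 'Texas Rangers',
--                 'Los Angeles Angels', 'Athletics'],
--     'NL East': ['Atlanta Braves', 'Philadelphia Phillies', 'New York Mets',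
--                 'Washington Nationals', 'Miami Marlins'],
--     'NL Central': ['Milwaukee Brewers', 'Chicago Cubs', 'St. Louis Cardinals',
--                    'Cincinnati Reds', 'Pittsburgh Pirates'],
--     'NL West': ['Los Angeles Dodgers', 'San Diego Padres', 'Arizona Diamondbacks',
--                 'San Francisco Giants', 'Colorado Rockies'],
-- }
--
-- LEAGUE_DIVISIONS = {
--     'AL': ['AL East', 'AL Central', 'AL West'],
--     'NL': ['NL East', 'NL Central', 'NL West'],
-- }
--
-- def determine_playoffs(wins):
--     """
--     2024+ MLBプレーオフ形式: 各リーグ6チーム = 計12チーム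
--     - ディビジョン優勝3チーム
--     - ワイルドカード3チーム（ディビジョン優勝以外で最高勝率3チーム）
--     """
--     playoffs = {'AL': [], 'NL': []}
--
--     for league, divs in LEAGUE_DIVISIONS.items():
--         div_winners = []
--         non_winners = []
--
--         for div_name in divs:
--             teams = DIVISIONS[div_name]
--             best_team = max(teams, key=lambda t: wins.get(t, 0))
--             div_winners.append(best_team)
--             for t in teams:
--                 if t != best_team:
--                     non_winners.append(t)
--
--         # ワイルドカード: 非優勝チームから上位3チーム
--         non_winners.sort(key=lambda t: wins.get(t, 0), reverse=True)
--         wild_cards = non_winners[:3]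
--
--         playoffs[league] = div_winners + wild_cards
--
--     return playoffs
-- ===== SOURCE B (Python) =====
-- DIVISIONS = {
--     'AL East': ['New York Yankees', 'Baltimore Orioles', 'Toronto Blue Jays',
--                 'Boston Red Sox', 'Tampa Bay Rays'],
--     'AL Central': ['Cleveland Guardians', 'Minnesota Twins', 'Kansas City Royals',
--                    'Detroit Tigers', 'Chicago White Sox'],
--     'AL West': ['Houston Astros', 'Seattle Mariners', 'Texas Rangers',
--                 'Los Angeles Angels', 'Athletics'],
--     'NL East': ['Atlanta Braves', 'Philadelphia Phillies', 'New York Mets',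
--                 'Washington Nationals', 'Miami Marlins'],
--     'NL Central': ['Milwaukee Brewers', 'Chicago Cubs', 'St. Louis Cardinals',
--                    'Cincinnati Reds', 'Pittsburgh Pirates'],
--     'NL West': ['Los Angeles Dodgers', 'San Diego Padres', 'Arizona Diamondbacks',
--                 'San Francisco Giants', 'Colorado Rockies'],
-- }
--
-- LEAGUE_DIVISIONS = {
--     'AL': ['AL East', 'AL Central', 'AL West'],
--     'NL': ['NL East', 'NL Central', 'NL West'],
-- }
--
-- def determine_playoffs(wins):
--     """One global stable sort per league: division winner = first team of its
--     division in the ranking; wildcards = top 3 of the remaining teams."""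
--     playoffs = {}
--     for league, divs in LEAGUE_DIVISIONS.items():
--         ranked = sorted([t for d in divs for t in DIVISIONS[d]],
--                         key=lambda t: wins.get(t, 0), reverse=True)
--         winners = [next(t for t in ranked if t in DIVISIONS[d]) for d in divs]
--         playoffs[league] = winners + [t for t in ranked if t not in winners][:3]
--     return playoffs
-- ===== Notes on version B (the rewrite author's own statement) =====
-- stated objective: alternative
-- what changed: Instead of A's per-division max plus a separate sort of the non-winners, B makes one stable descending sort of all 15 teams per league, reads each division winner off as the first ranked team of that division, and takes the wildcards as the first three ranked teams that are not winners.
import Mathlib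
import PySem

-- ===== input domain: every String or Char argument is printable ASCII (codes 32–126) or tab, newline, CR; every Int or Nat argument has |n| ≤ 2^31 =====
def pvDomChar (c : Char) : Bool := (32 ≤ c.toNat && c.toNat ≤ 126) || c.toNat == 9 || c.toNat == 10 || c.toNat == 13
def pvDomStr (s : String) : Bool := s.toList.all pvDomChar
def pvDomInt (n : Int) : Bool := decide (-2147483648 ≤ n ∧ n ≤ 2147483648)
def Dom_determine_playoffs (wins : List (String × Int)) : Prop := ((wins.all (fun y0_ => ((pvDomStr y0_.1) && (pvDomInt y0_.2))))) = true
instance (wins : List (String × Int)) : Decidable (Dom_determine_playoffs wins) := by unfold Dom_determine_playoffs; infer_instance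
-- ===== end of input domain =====

-- B replaces A's per-division max + separate sort of the non-winners by ONE stable descending
-- sort of each league's 15 teams, reading winners and wildcards off that single ranking
-- (objective: alternative decomposition, same cost).

-- ===== PORT A =====
-- module constant DIVISIONS (a dict)
def pvDivisions : PySem.Dict String (List String) :=
  PySem.Dict.mk
  [("AL East", ["New York Yankees", "Baltimore Orioles", "Toronto Blue Jays",
                "Boston Red Sox", "Tampa Bay Rays"]),
   ("AL Central", ["Cleveland Guardians", "Minnesota Twins", "Kansas City Royals",
                   "Detroit Tigers", "Chicago White Sox"]),
   ("AL West", ["Houston Astros", "Seattle Mariners", "Texas Rangers",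
                "Los Angeles Angels", "Athletics"]),
   ("NL East", ["Atlanta Braves", "Philadelphia Phillies", "New York Mets",
                "Washington Nationals", "Miami Marlins"]),
   ("NL Central", ["Milwaukee Brewers", "Chicago Cubs", "St. Louis Cardinals",
                   "Cincinnati Reds", "Pittsburgh Pirates"]),
   ("NL West", ["Los Angeles Dodgers", "San Diego Padres", "Arizona Diamondbacks",
                "San Francisco Giants", "Colorado Rockies"])]

-- module constant LEAGUE_DIVISIONS (a dict)
def pvLeagueDivisions : PySem.Dict String (List String) :=
  PySem.Dict.mk
  [("AL", ["AL East", "AL Central", "AL West"]),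
   ("NL", ["NL East", "NL Central", "NL West"])]

-- A: per league, per division take max(teams, key=wins.get(t,0)) and collect the non-winners,
-- then sort the non-winners descending and take 3.
-- DIVISIONS[div_name]: the key is always a key of the dict, so .getD [] is exact;
-- max(teams, ...): teams is always nonempty, so PySem.List.max? is always some and .getD "" is exact.
def determine_playoffs (wins : List (String × Int)) : List (String × List String) :=
  pvLeagueDivisions.items.map (fun ld =>
    let st := ld.2.foldl (fun (st : List String × List String) dn =>
      let teams := PySem.Dict.getD pvDivisions dn []
      let best := (PySem.List.max? teams (fun t => PySem.Dict.getD (PySem.Dict.mk wins) t 0)).getD ""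
      (st.1 ++ [best], st.2 ++ teams.filter (fun t => t != best))) ([], [])
    let wild := (PySem.List.sorted st.2 (fun t => PySem.Dict.getD (PySem.Dict.mk wins) t 0) true).take 3
    (ld.1, st.1 ++ wild))

-- ===== PORT B =====
-- B: one stable descending sort of all 15 teams of the league; each division winner is the first
-- ranked team belonging to that division; wildcards = first 3 ranked teams that are not winners.
-- next(t for t in ranked if t in DIVISIONS[d]) always finds a team, so find? is always some
-- and .getD "" is exact.
def determine_playoffs_alt (wins : List (String × Int)) : List (String × List String) :=
  pvLeagueDivisions.items.map (fun ld =>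
    let ranked := PySem.List.sorted (ld.2.flatMap (fun d => PySem.Dict.getD pvDivisions d []))
                    (fun t => PySem.Dict.getD (PySem.Dict.mk wins) t 0) true
    let winners := ld.2.map (fun d =>
      (ranked.find? (fun t => (PySem.Dict.getD pvDivisions d []).contains t)).getD "")
    (ld.1, winners ++ (ranked.filter (fun t => !(winners.contains t))).take 3))

-- ===== PRECONDITION & SPEC =====
def Spec_determine_playoffs (wins : List (String × Int)) (out : List (String × List String)) : Prop := out = determine_playoffs_alt wins
instance (wins : List (String × Int)) (out : List (String × List String)) : Decidable (Spec_determine_playoffs wins out) := by unfold Spec_determine_playoffs; infer_instance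

-- ===== CLAIM (what is proved, stated in full; the proofs are below) =====
def Claim_equal_determine_playoffs : Prop := ∀ (wins : List (String × Int)), Dom_determine_playoffs wins → Spec_determine_playoffs wins (determine_playoffs wins)

-- ===== LEMMAS AND PROOFS =====

-- insertBy puts x in front when x beats the whole list
theorem pv_insertBy_top (g : String → Int) (x : String) (zs : List String)
    (h : ∀ z ∈ zs, g z < g x) :
    PySem.List.insertBy (fun a b => decide (g b < g a)) x zs = x :: zs := by
  cases zs with
  | nil => rfl
  | cons z zs =>
      simp [PySem.List.insertBy]
      intro hc
      exact absurd (h z (by simp)) (by simpa using hc)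

-- filtering commutes with inserting into a descending-sorted list
theorem pv_filter_insertBy (g : String → Int) (p : String → Bool) (x : String) (ys : List String)
    (h : ys.Pairwise (fun a b => g b ≤ g a)) :
    (PySem.List.insertBy (fun a b => decide (g b < g a)) x ys).filter p
      = if p x then PySem.List.insertBy (fun a b => decide (g b < g a)) x (ys.filter p)
        else ys.filter p := by
  induction ys with
  | nil => split <;> simp_all [PySem.List.insertBy]
  | cons y ys ih =>
      have hpw := (List.pairwise_cons.mp h).1
      have htl := (List.pairwise_cons.mp h).2
      by_cases hxy : g y < g x
      · have : PySem.List.insertBy (fun a b => decide (g b < g a)) x (y :: ys) = x :: y :: ys := by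
          simp [PySem.List.insertBy, hxy]
        rw [this]
        by_cases hpx : p x
        · rw [if_pos hpx, pv_insertBy_top]
          · simp [List.filter_cons, hpx]
          · intro z hz
            have hz' : z ∈ y :: ys := List.mem_of_mem_filter hz
            rcases List.mem_cons.mp hz' with rfl | hz''
            · exact hxy
            · exact lt_of_le_of_lt (hpw z hz'') hxy
        · simp [hpx, List.filter_cons]
      · have : PySem.List.insertBy (fun a b => decide (g b < g a)) x (y :: ys) =
            y :: PySem.List.insertBy (fun a b => decide (g b < g a)) x ys := by
          simp [PySem.List.insertBy, hxy]
        rw [this, List.filter_cons]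
        by_cases hpy : p y <;> by_cases hpx : p x <;>
          simp [hpy, hpx, ih htl, PySem.List.insertBy, hxy]

-- sorted of a snoc = insert into sorted
theorem pv_sorted_append_singleton (g : String → Int) (xs : List String) (x : String) :
    PySem.List.sorted (xs ++ [x]) g true
      = PySem.List.insertBy (fun a b => decide (g b < g a)) x (PySem.List.sorted xs g true) := by
  rw [PySem.List.sorted_rev_eq_foldl_insertBy, PySem.List.sorted_rev_eq_foldl_insertBy,
    List.foldl_append]
  rfl

-- filtering commutes with Python's stable descending sort
theorem pv_filter_sorted (g : String → Int) (p : String → Bool) (xs : List String) :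
    (PySem.List.sorted xs g true).filter p = PySem.List.sorted (xs.filter p) g true := by
  induction xs using List.reverseRecOn with
  | nil => rfl
  | append_singleton xs x ih =>
      rw [pv_sorted_append_singleton,
        pv_filter_insertBy g p x _ (PySem.List.sorted_pairwise_rev xs g), ih, List.filter_append]
      by_cases hpx : p x
      · simp [hpx, pv_sorted_append_singleton]
      · simp [hpx]

-- Python's first-maximum max(xs, key) is the head of the stable descending sort
theorem pv_max?_eq_head_sorted (g : String → Int) (xs : List String) :
    PySem.List.max? xs g = (PySem.List.sorted xs g true).head? := by
  induction xs using List.reverseRecOn with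
  | nil => rfl
  | append_singleton xs x ih =>
      rw [pv_sorted_append_singleton]
      simp only [PySem.List.max?] at ih ⊢
      rw [List.foldl_append, List.foldl_cons, List.foldl_nil, ih]
      cases hS : PySem.List.sorted xs g true with
      | nil => rfl
      | cons y t =>
          by_cases hxy : g y < g x <;> simp [PySem.List.insertBy, hxy]

-- the first ranked team of a division is the division's max
theorem pv_find_winner (g : String → Int) (t T : List String)
    (hT : T.filter (fun x => t.contains x) = t) :
    ((PySem.List.sorted T g true).find? (fun x => t.contains x)).getD ""
      = (PySem.List.max? t g).getD "" := by
  rw [← List.head?_filter, pv_filter_sorted, hT, pv_max?_eq_head_sorted]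

theorem pv_maxD_mem (g : String → Int) (t : List String) (h : t ≠ []) :
    (PySem.List.max? t g).getD "" ∈ t := by
  cases hm : PySem.List.max? t g with
  | none => exact absurd ((PySem.List.max?_eq_none_iff t g).mp hm) h
  | some m => simpa using PySem.List.max?_mem hm

-- dropping the three winners from the league list = A's concatenation of per-division non-winners
theorem pv_filter_nonwinners (g : String → Int) (t1 t2 t3 : List String)
    (h1 : t1 ≠ []) (h2 : t2 ≠ []) (h3 : t3 ≠ [])
    (d12 : ∀ x ∈ t1, x ∉ t2) (d13 : ∀ x ∈ t1, x ∉ t3) (d23 : ∀ x ∈ t2, x ∉ t3) :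
    (t1 ++ (t2 ++ t3)).filter
        (fun x => !(List.contains [(PySem.List.max? t1 g).getD "",
                                   (PySem.List.max? t2 g).getD "",
                                   (PySem.List.max? t3 g).getD ""] x))
      = t1.filter (fun x => x != (PySem.List.max? t1 g).getD "")
        ++ (t2.filter (fun x => x != (PySem.List.max? t2 g).getD "")
            ++ t3.filter (fun x => x != (PySem.List.max? t3 g).getD "")) := by
  have hb1 := pv_maxD_mem g t1 h1
  have hb2 := pv_maxD_mem g t2 h2
  have hb3 := pv_maxD_mem g t3 h3
  rw [List.filter_append, List.filter_append]
  refine congrArg₂ _ ?_ (congrArg₂ _ ?_ ?_) <;> apply List.filter_congr <;> intro x hx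
  · have n2 : x ≠ (PySem.List.max? t2 g).getD "" := fun e => d12 x hx (e ▸ hb2)
    have n3 : x ≠ (PySem.List.max? t3 g).getD "" := fun e => d13 x hx (e ▸ hb3)
    simp [n2, n3, bne, beq_eq_decide]
  · have n1 : x ≠ (PySem.List.max? t1 g).getD "" := fun e => d12 _ (e ▸ hb1) hx
    have n3 : x ≠ (PySem.List.max? t3 g).getD "" := fun e => d23 x hx (e ▸ hb3)
    simp [n1, n3, bne, beq_eq_decide]
  · have n1 : x ≠ (PySem.List.max? t1 g).getD "" := fun e => d13 _ (e ▸ hb1) hx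
    have n2 : x ≠ (PySem.List.max? t2 g).getD "" := fun e => d23 _ (e ▸ hb2) hx
    simp [n1, n2, bne, beq_eq_decide]

-- one league: A's (winners, sorted non-winners) = B's read-offs from the single global sort
theorem pv_league (g : String → Int) (t1 t2 t3 T : List String)
    (hTT : T = t1 ++ (t2 ++ t3))
    (h1 : t1 ≠ []) (h2 : t2 ≠ []) (h3 : t3 ≠ [])
    (d12 : ∀ x ∈ t1, x ∉ t2) (d13 : ∀ x ∈ t1, x ∉ t3) (d23 : ∀ x ∈ t2, x ∉ t3) :
    (PySem.List.max? t1 g).getD ""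
        = ((PySem.List.sorted T g true).find? (fun x => t1.contains x)).getD ""
      ∧ (PySem.List.max? t2 g).getD ""
        = ((PySem.List.sorted T g true).find? (fun x => t2.contains x)).getD ""
      ∧ (PySem.List.max? t3 g).getD ""
        = ((PySem.List.sorted T g true).find? (fun x => t3.contains x)).getD ""
      ∧ (PySem.List.sorted
            (t1.filter (fun x => x != (PySem.List.max? t1 g).getD "")
              ++ (t2.filter (fun x => x != (PySem.List.max? t2 g).getD "")
                  ++ t3.filter (fun x => x != (PySem.List.max? t3 g).getD ""))) g true).take 3
        = ((PySem.List.sorted T g true).filter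
            (fun x => !(List.contains
              [((PySem.List.sorted T g true).find? (fun x => t1.contains x)).getD "",
               ((PySem.List.sorted T g true).find? (fun x => t2.contains x)).getD "",
               ((PySem.List.sorted T g true).find? (fun x => t3.contains x)).getD ""] x))).take 3 := by
  subst hTT
  have hmem : ∀ (u : List String) (a : String), a ∈ u → u.contains a = true := by
    intro u a ha; simpa [List.elem_iff] using ha
  have hT1 : (t1 ++ (t2 ++ t3)).filter (fun x => t1.contains x) = t1 := by
    rw [List.filter_append, List.filter_append,
      List.filter_eq_self.mpr (fun a ha => hmem t1 a ha),
      List.filter_eq_nil_iff.mpr (fun a ha hc => (d12 a · ha) (List.elem_iff.mp hc)),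
      List.filter_eq_nil_iff.mpr (fun a ha hc => (d13 a · ha) (List.elem_iff.mp hc))]
    simp
  have hT2 : (t1 ++ (t2 ++ t3)).filter (fun x => t2.contains x) = t2 := by
    rw [List.filter_append, List.filter_append,
      List.filter_eq_nil_iff.mpr (fun a ha hc => d12 a ha (List.elem_iff.mp hc)),
      List.filter_eq_self.mpr (fun a ha => hmem t2 a ha),
      List.filter_eq_nil_iff.mpr (fun a ha hc => (d23 a · ha) (List.elem_iff.mp hc))]
    simp
  have hT3 : (t1 ++ (t2 ++ t3)).filter (fun x => t3.contains x) = t3 := by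
    rw [List.filter_append, List.filter_append,
      List.filter_eq_nil_iff.mpr (fun a ha hc => d13 a ha (List.elem_iff.mp hc)),
      List.filter_eq_nil_iff.mpr (fun a ha hc => d23 a ha (List.elem_iff.mp hc)),
      List.filter_eq_self.mpr (fun a ha => hmem t3 a ha)]
    simp
  refine ⟨(pv_find_winner g t1 _ hT1).symm, (pv_find_winner g t2 _ hT2).symm,
    (pv_find_winner g t3 _ hT3).symm, ?_⟩
  rw [pv_find_winner g t1 _ hT1, pv_find_winner g t2 _ hT2, pv_find_winner g t3 _ hT3,
    pv_filter_sorted, pv_filter_nonwinners g t1 t2 t3 h1 h2 h3 d12 d13 d23]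

-- ===== VERDICT (by name: the statement is the Claim_ definition above) =====
set_option maxHeartbeats 1000000 in
theorem determine_playoffs_spec : Claim_equal_determine_playoffs := by
  intro wins _
  show determine_playoffs wins = determine_playoffs_alt wins
  have eALE : PySem.Dict.getD pvDivisions "AL East" [] = ["New York Yankees", "Baltimore Orioles", "Toronto Blue Jays", "Boston Red Sox", "Tampa Bay Rays"] := rfl
  have eALC : PySem.Dict.getD pvDivisions "AL Central" [] = ["Cleveland Guardians", "Minnesota Twins", "Kansas City Royals", "Detroit Tigers", "Chicago White Sox"] := rfl
  have eALW : PySem.Dict.getD pvDivisions "AL West" [] = ["Houston Astros", "Seattle Mariners", "Texas Rangers", "Los Angeles Angels", "Athletics"] := rfl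
  have eNLE : PySem.Dict.getD pvDivisions "NL East" [] = ["Atlanta Braves", "Philadelphia Phillies", "New York Mets", "Washington Nationals", "Miami Marlins"] := rfl
  have eNLC : PySem.Dict.getD pvDivisions "NL Central" [] = ["Milwaukee Brewers", "Chicago Cubs", "St. Louis Cardinals", "Cincinnati Reds", "Pittsburgh Pirates"] := rfl
  have eNLW : PySem.Dict.getD pvDivisions "NL West" [] = ["Los Angeles Dodgers", "San Diego Padres", "Arizona Diamondbacks", "San Francisco Giants", "Colorado Rockies"] := rfl
  unfold determine_playoffs determine_playoffs_alt
  simp only [pvLeagueDivisions, List.map, List.foldl, List.flatMap_cons, List.flatMap_nil,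
    eALE, eALC, eALW, eNLE, eNLC, eNLW, List.append_nil, List.nil_append, List.append_assoc,
    List.cons_append, List.cons.injEq, Prod.mk.injEq, true_and, and_true]
  constructor
  · exact pv_league _ ["New York Yankees", "Baltimore Orioles", "Toronto Blue Jays", "Boston Red Sox", "Tampa Bay Rays"]
      ["Cleveland Guardians", "Minnesota Twins", "Kansas City Royals", "Detroit Tigers", "Chicago White Sox"]
      ["Houston Astros", "Seattle Mariners", "Texas Rangers", "Los Angeles Angels", "Athletics"]
      _ rfl (by decide) (by decide) (by decide) (by decide) (by decide) (by decide)
  · exact pv_league _ ["Atlanta Braves", "Philadelphia Phillies", "New York Mets", "Washington Nationals", "Miami Marlins"]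
      ["Milwaukee Brewers", "Chicago Cubs", "St. Louis Cardinals", "Cincinnati Reds", "Pittsburgh Pirates"]
      ["Los Angeles Dodgers", "San Diego Padres", "Arizona Diamondbacks", "San Francisco Giants", "Colorado Rockies"]
      _ rfl (by decide) (by decide) (by decide) (by decide) (by decide) (by decide)
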